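-- pv_equiv track=rewrite | github.com/zoom2ashish/Legal-AI-Case-Advisor | backend/agents/document_agent.py | _prioritize_opportunities
-- ===== SOURCE A (Python) =====
-- from typing import Dict, Any, List, Optional, Tuple
--
-- def _prioritize_opportunities(opportunity_categories: Dict) -> List[Dict]:
--     """Prioritize identified opportunities"""
--     all_opportunities = []
--
--     for category, opportunities in opportunity_categories.items():
--         for opportunity in opportunities:
--             opportunity['category'] = category
--             all_opportunities.append(opportunity)
--
--     # Sort by priority (high > medium > low)
--     priority_order = {'high': 3, 'medium': 2, 'low': 1}
--     all_opportunities.sort(key=lambda x: priority_order.get(x.get('priority', 'low'), 0), reverse=True)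
--
--     return all_opportunities[:10]  # Top 10 priorities
-- ===== SOURCE B (Python) =====
-- def _prioritize_opportunities(opportunity_categories):
--     """Prioritize identified opportunities (bucket pass instead of a comparison sort).
--     Note: like the original, this sets opportunity['category'] in place."""
--     high, medium, low, other = [], [], [], []
--     for category, opportunities in opportunity_categories.items():
--         for opportunity in opportunities:
--             opportunity['category'] = category
--             p = opportunity.get('priority', 'low')
--             if p == 'high':
--                 high.append(opportunity)
--             elif p == 'medium':
--                 medium.append(opportunity)
--             elif p == 'low':
--                 low.append(opportunity)
--             else:
--                 other.append(opportunity)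
--     return (high + medium + low + other)[:10]
-- ===== Notes on version B (the rewrite author's own statement) =====
-- stated objective: alternative
-- what changed: Replaces the flatten-then-stable-sort (comparison sort keyed by a priority dict) with a single bucketing pass that appends each opportunity to one of four ordered lists (high/medium/low/other, with a missing 'priority' treated as 'low' and an unknown value as 'other') and concatenates them, a linear counting-sort.
import Mathlib
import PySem

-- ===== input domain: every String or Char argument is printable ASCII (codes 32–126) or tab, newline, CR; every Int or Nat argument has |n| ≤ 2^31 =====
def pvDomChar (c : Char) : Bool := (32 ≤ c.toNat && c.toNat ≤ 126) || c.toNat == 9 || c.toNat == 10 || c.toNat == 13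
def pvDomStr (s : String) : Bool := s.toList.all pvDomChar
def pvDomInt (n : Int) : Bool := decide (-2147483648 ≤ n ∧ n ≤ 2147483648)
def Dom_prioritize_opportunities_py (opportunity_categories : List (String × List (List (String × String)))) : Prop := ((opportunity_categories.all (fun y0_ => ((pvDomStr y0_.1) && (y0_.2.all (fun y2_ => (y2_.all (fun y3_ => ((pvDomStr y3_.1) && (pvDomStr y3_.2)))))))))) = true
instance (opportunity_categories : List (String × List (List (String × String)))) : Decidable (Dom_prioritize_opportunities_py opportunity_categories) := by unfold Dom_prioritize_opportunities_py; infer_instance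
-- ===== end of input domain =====

-- B replaces A's stable descending sort by priority with a single pass that routes each
-- opportunity into one of four ordered buckets (high/medium/low/other) and concatenates them;
-- like A it sets opportunity['category'] in place (the theorems are about the return value).

-- ===== PORT A =====
-- priority_order = {'high': 3, 'medium': 2, 'low': 1}; key = lambda x: priority_order.get(x.get('priority', 'low'), 0)
def pvPrioKey (x : List (String × String)) : Int :=
  PySem.Dict.getD (PySem.Dict.mk [("high", (3 : Int)), ("medium", 2), ("low", 1)])
    (PySem.Dict.getD (PySem.Dict.mk x) "priority" "low") 0

def prioritize_opportunities_py (opportunity_categories : List (String × List (List (String × String)))) : List (List (String × String)) :=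
  -- for category, opportunities in …items(): for opportunity in …: opportunity['category'] = category; all_opportunities.append(opportunity)
  let all_opportunities : List (List (String × String)) :=
    opportunity_categories.foldl (fun acc p =>
      p.2.foldl (fun acc opp => acc ++ [(PySem.Dict.insert (PySem.Dict.mk opp) "category" p.1).items]) acc) []
  -- all_opportunities.sort(key=…, reverse=True); return all_opportunities[:10]
  PySem.List.slice (PySem.List.sorted all_opportunities pvPrioKey true) none (some 10)

-- ===== PORT B =====
-- append one (mutated) opportunity to the bucket named by its 'priority' string
def pvRoute (st : List (List (String × String)) × List (List (String × String)) × List (List (String × String)) × List (List (String × String)))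
    (category : String) (opp : List (String × String)) :
    List (List (String × String)) × List (List (String × String)) × List (List (String × String)) × List (List (String × String)) :=
  let opp' := (PySem.Dict.insert (PySem.Dict.mk opp) "category" category).items
  let p := PySem.Dict.getD (PySem.Dict.mk opp') "priority" "low"
  if p == "high" then (st.1 ++ [opp'], st.2.1, st.2.2.1, st.2.2.2)
  else if p == "medium" then (st.1, st.2.1 ++ [opp'], st.2.2.1, st.2.2.2)
  else if p == "low" then (st.1, st.2.1, st.2.2.1 ++ [opp'], st.2.2.2)
  else (st.1, st.2.1, st.2.2.1, st.2.2.2 ++ [opp'])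

def prioritize_opportunities_py_alt (opportunity_categories : List (String × List (List (String × String)))) : List (List (String × String)) :=
  let st := opportunity_categories.foldl (fun st p => p.2.foldl (fun st opp => pvRoute st p.1 opp) st) ([], [], [], [])
  PySem.List.slice (st.1 ++ st.2.1 ++ st.2.2.1 ++ st.2.2.2) none (some 10)

-- ===== PRECONDITION & SPEC =====
def Spec_prioritize_opportunities_py (opportunity_categories : List (String × List (List (String × String)))) (out : List (List (String × String))) : Prop := out = prioritize_opportunities_py_alt opportunity_categories
instance (opportunity_categories : List (String × List (List (String × String)))) (out : List (List (String × String))) : Decidable (Spec_prioritize_opportunities_py opportunity_categories out) := by unfold Spec_prioritize_opportunities_py; infer_instance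

-- ===== CLAIM (what is proved, stated in full; the proofs are below) =====
def Claim_equal_prioritize_opportunities_py : Prop := ∀ (opportunity_categories : List (String × List (List (String × String)))), Dom_prioritize_opportunities_py opportunity_categories → Spec_prioritize_opportunities_py opportunity_categories (prioritize_opportunities_py opportunity_categories)

-- ===== LEMMAS AND PROOFS =====

-- A's sort key written as B's three string tests (so it only takes the values 3,2,1,0)
lemma pvPrioKey_eq (x : List (String × String)) :
    pvPrioKey x =
      (if PySem.Dict.getD (PySem.Dict.mk x) "priority" "low" == "high" then 3
       else if PySem.Dict.getD (PySem.Dict.mk x) "priority" "low" == "medium" then 2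
       else if PySem.Dict.getD (PySem.Dict.mk x) "priority" "low" == "low" then (1 : Int) else 0) := by
  unfold pvPrioKey
  generalize PySem.Dict.getD (PySem.Dict.mk x) "priority" "low" = p
  by_cases h1 : p = "high"
  · subst h1; rfl
  have e1 : ("high" == p) = false := beq_eq_false_iff_ne.mpr (fun h => h1 h.symm)
  have f1 : (p == "high") = false := beq_eq_false_iff_ne.mpr h1
  by_cases h2 : p = "medium"
  · subst h2; rfl
  have e2 : ("medium" == p) = false := beq_eq_false_iff_ne.mpr (fun h => h2 h.symm)
  have f2 : (p == "medium") = false := beq_eq_false_iff_ne.mpr h2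
  by_cases h3 : p = "low"
  · subst h3; rfl
  have e3 : ("low" == p) = false := beq_eq_false_iff_ne.mpr (fun h => h3 h.symm)
  have f3 : (p == "low") = false := beq_eq_false_iff_ne.mpr h3
  simp [PySem.Dict.getD, PySem.Dict.get?, List.find?, e1, e2, e3, f1, f2, f3]

lemma pvPrioKey_cases (x : List (String × String)) :
    pvPrioKey x = 3 ∨ pvPrioKey x = 2 ∨ pvPrioKey x = 1 ∨ pvPrioKey x = 0 := by
  rw [pvPrioKey_eq]; split_ifs <;> simp

-- stable insertion at the boundary between the kept prefix and the strictly-smaller suffix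
lemma pv_insertBy_split {α : Type} (before : α → α → Bool) (x : α) (ys zs : List α)
    (h1 : ∀ y ∈ ys, before x y = false) (h2 : ∀ z ∈ zs, before x z = true) :
    PySem.List.insertBy before x (ys ++ zs) = ys ++ x :: zs := by
  induction ys with
  | nil =>
    cases zs with
    | nil => simp [PySem.List.insertBy]
    | cons z t => simp [PySem.List.insertBy, h2 z (by simp)]
  | cons y ys ih =>
    have hy : before x y = false := h1 y (by simp)
    simp [PySem.List.insertBy, hy, ih (fun y hy => h1 y (by simp [hy]))]

-- invariant of A's insertion sort: the accumulator stays in bucketed form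
lemma pv_foldl_buckets (xs : List (List (String × String))) :
    ∀ b3 b2 b1 b0 : List (List (String × String)),
      (∀ y ∈ b3, pvPrioKey y = 3) → (∀ y ∈ b2, pvPrioKey y = 2) →
      (∀ y ∈ b1, pvPrioKey y = 1) → (∀ y ∈ b0, pvPrioKey y = 0) →
      xs.foldl (fun acc x => PySem.List.insertBy (fun a b => decide (pvPrioKey b < pvPrioKey a)) x acc)
        (b3 ++ (b2 ++ (b1 ++ b0))) =
      (b3 ++ xs.filter (fun x => pvPrioKey x == 3)) ++
        ((b2 ++ xs.filter (fun x => pvPrioKey x == 2)) ++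
          ((b1 ++ xs.filter (fun x => pvPrioKey x == 1)) ++ (b0 ++ xs.filter (fun x => pvPrioKey x == 0)))) := by
  induction xs with
  | nil => intro b3 b2 b1 b0 _ _ _ _; simp
  | cons x xs ih =>
    intro b3 b2 b1 b0 h3 h2 h1 h0
    simp only [List.foldl_cons, List.filter_cons]
    rcases pvPrioKey_cases x with hk | hk | hk | hk
    · rw [pv_insertBy_split _ x b3 (b2 ++ (b1 ++ b0))
        (fun y hy => by simp [hk, h3 y hy])
        (fun z hz => by
          rcases List.mem_append.1 hz with hz | hz
          · simp [hk, h2 z hz]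
          · rcases List.mem_append.1 hz with hz' | hz'
            · simp [hk, h1 z hz']
            · simp [hk, h0 z hz'])]
      rw [show b3 ++ x :: (b2 ++ (b1 ++ b0)) = (b3 ++ [x]) ++ (b2 ++ (b1 ++ b0)) by simp]
      rw [ih (b3 ++ [x]) b2 b1 b0
        (by intro y hy; rcases List.mem_append.1 hy with h | h
            · exact h3 y h
            · simp at h; subst h; exact hk) h2 h1 h0]
      simp [hk, List.append_assoc]
    · rw [show b3 ++ (b2 ++ (b1 ++ b0)) = (b3 ++ b2) ++ (b1 ++ b0) by simp]
      rw [pv_insertBy_split _ x (b3 ++ b2) (b1 ++ b0)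
        (fun y hy => by
          rcases List.mem_append.1 hy with h | h
          · simp [hk, h3 y h]
          · simp [hk, h2 y h])
        (fun z hz => by
          rcases List.mem_append.1 hz with h | h
          · simp [hk, h1 z h]
          · simp [hk, h0 z h])]
      rw [show (b3 ++ b2) ++ x :: (b1 ++ b0) = b3 ++ ((b2 ++ [x]) ++ (b1 ++ b0)) by simp]
      rw [ih b3 (b2 ++ [x]) b1 b0 h3
        (by intro y hy; rcases List.mem_append.1 hy with h | h
            · exact h2 y h
            · simp at h; subst h; exact hk) h1 h0]
      simp [hk, List.append_assoc]
    · rw [show b3 ++ (b2 ++ (b1 ++ b0)) = (b3 ++ (b2 ++ b1)) ++ b0 by simp]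
      rw [pv_insertBy_split _ x (b3 ++ (b2 ++ b1)) b0
        (fun y hy => by
          rcases List.mem_append.1 hy with h | h
          · simp [hk, h3 y h]
          · rcases List.mem_append.1 h with h' | h'
            · simp [hk, h2 y h']
            · simp [hk, h1 y h'])
        (fun z hz => by simp [hk, h0 z hz])]
      rw [show (b3 ++ (b2 ++ b1)) ++ x :: b0 = b3 ++ (b2 ++ ((b1 ++ [x]) ++ b0)) by simp]
      rw [ih b3 b2 (b1 ++ [x]) b0 h3 h2
        (by intro y hy; rcases List.mem_append.1 hy with h | h
            · exact h1 y h
            · simp at h; subst h; exact hk) h0]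
      simp [hk, List.append_assoc]
    · rw [PySem.List.insertBy_of_forall_not_before _ x (b3 ++ (b2 ++ (b1 ++ b0)))
        (fun y hy => by
          rcases List.mem_append.1 hy with h | h
          · simp [hk, h3 y h]
          · rcases List.mem_append.1 h with h' | h'
            · simp [hk, h2 y h']
            · rcases List.mem_append.1 h' with h'' | h''
              · simp [hk, h1 y h'']
              · simp [hk, h0 y h''])]
      rw [show (b3 ++ (b2 ++ (b1 ++ b0))) ++ [x] = b3 ++ (b2 ++ (b1 ++ (b0 ++ [x]))) by simp]
      rw [ih b3 b2 b1 (b0 ++ [x]) h3 h2 h1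
        (by intro y hy; rcases List.mem_append.1 hy with h | h
            · exact h0 y h
            · simp at h; subst h; exact hk)]
      simp [hk, List.append_assoc]

-- A's stable reverse sort, with this {3,2,1,0}-valued key, IS bucket concatenation
lemma pv_sorted_eq (xs : List (List (String × String))) :
    PySem.List.sorted xs pvPrioKey true =
      xs.filter (fun x => pvPrioKey x == 3) ++
        (xs.filter (fun x => pvPrioKey x == 2) ++
          (xs.filter (fun x => pvPrioKey x == 1) ++ xs.filter (fun x => pvPrioKey x == 0))) := by
  rw [PySem.List.sorted_rev_eq_foldl_insertBy]
  simpa using pv_foldl_buckets xs [] [] [] [] (by simp) (by simp) (by simp) (by simp)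

-- the flattened, mutated opportunity list both programs traverse
def pvFlat (opportunity_categories : List (String × List (List (String × String)))) : List (List (String × String)) :=
  opportunity_categories.flatMap (fun p => p.2.map (fun opp => (PySem.Dict.insert (PySem.Dict.mk opp) "category" p.1).items))

lemma pv_A_flat (cats : List (String × List (List (String × String)))) :
    cats.foldl (fun acc p =>
        p.2.foldl (fun acc opp => acc ++ [(PySem.Dict.insert (PySem.Dict.mk opp) "category" p.1).items]) acc) [] =
      pvFlat cats := by
  have h : (fun (acc : List (List (String × String))) (p : String × List (List (String × String))) =>
      p.2.foldl (fun acc opp => acc ++ [(PySem.Dict.insert (PySem.Dict.mk opp) "category" p.1).items]) acc)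
      = fun acc p => acc ++ p.2.map (fun opp => (PySem.Dict.insert (PySem.Dict.mk opp) "category" p.1).items) := by
    funext acc p
    exact PySem.List.foldl_append_singleton_eq_map _ _ _
  rw [h, pvFlat]
  simpa using PySem.List.foldl_append_eq_flatMap
    (fun p : String × List (List (String × String)) =>
      p.2.map (fun opp => (PySem.Dict.insert (PySem.Dict.mk opp) "category" p.1).items)) cats []

-- B's inner pass over one category: each bucket grows by the corresponding key-filter
lemma pv_B_inner (cat : String) (opps : List (List (String × String))) :
    ∀ h m l o : List (List (String × String)),
      opps.foldl (fun st opp => pvRoute st cat opp) (h, m, l, o) =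
      (h ++ (opps.map (fun opp => (PySem.Dict.insert (PySem.Dict.mk opp) "category" cat).items)).filter (fun x => pvPrioKey x == 3),
       m ++ (opps.map (fun opp => (PySem.Dict.insert (PySem.Dict.mk opp) "category" cat).items)).filter (fun x => pvPrioKey x == 2),
       l ++ (opps.map (fun opp => (PySem.Dict.insert (PySem.Dict.mk opp) "category" cat).items)).filter (fun x => pvPrioKey x == 1),
       o ++ (opps.map (fun opp => (PySem.Dict.insert (PySem.Dict.mk opp) "category" cat).items)).filter (fun x => pvPrioKey x == 0)) := by
  induction opps with
  | nil => intro h m l o; simp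
  | cons opp opps ih =>
    intro h m l o
    simp only [List.foldl_cons, List.map_cons, List.filter_cons]
    have hkey := pvPrioKey_eq ((PySem.Dict.insert (PySem.Dict.mk opp) "category" cat).items)
    by_cases c1 : (PySem.Dict.getD (PySem.Dict.mk ((PySem.Dict.insert (PySem.Dict.mk opp) "category" cat).items)) "priority" "low" == "high") = true
    · have hk : pvPrioKey ((PySem.Dict.insert (PySem.Dict.mk opp) "category" cat).items) = 3 := by
        rw [hkey]; simp [c1]
      rw [show pvRoute (h, m, l, o) cat opp = (h ++ [(PySem.Dict.insert (PySem.Dict.mk opp) "category" cat).items], m, l, o) from by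
        simp [pvRoute, c1]]
      rw [ih]
      simp [hk, List.append_assoc]
    by_cases c2 : (PySem.Dict.getD (PySem.Dict.mk ((PySem.Dict.insert (PySem.Dict.mk opp) "category" cat).items)) "priority" "low" == "medium") = true
    · have hk : pvPrioKey ((PySem.Dict.insert (PySem.Dict.mk opp) "category" cat).items) = 2 := by
        rw [hkey]; simp [c1, c2]
      rw [show pvRoute (h, m, l, o) cat opp = (h, m ++ [(PySem.Dict.insert (PySem.Dict.mk opp) "category" cat).items], l, o) from by
        simp [pvRoute, c1, c2]]
      rw [ih]
      simp [hk, List.append_assoc]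
    by_cases c3 : (PySem.Dict.getD (PySem.Dict.mk ((PySem.Dict.insert (PySem.Dict.mk opp) "category" cat).items)) "priority" "low" == "low") = true
    · have hk : pvPrioKey ((PySem.Dict.insert (PySem.Dict.mk opp) "category" cat).items) = 1 := by
        rw [hkey]; simp [c1, c2, c3]
      rw [show pvRoute (h, m, l, o) cat opp = (h, m, l ++ [(PySem.Dict.insert (PySem.Dict.mk opp) "category" cat).items], o) from by
        simp [pvRoute, c1, c2, c3]]
      rw [ih]
      simp [hk, List.append_assoc]
    · have hk : pvPrioKey ((PySem.Dict.insert (PySem.Dict.mk opp) "category" cat).items) = 0 := by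
        rw [hkey]; simp [c1, c2, c3]
      rw [show pvRoute (h, m, l, o) cat opp = (h, m, l, o ++ [(PySem.Dict.insert (PySem.Dict.mk opp) "category" cat).items]) from by
        simp [pvRoute, c1, c2, c3]]
      rw [ih]
      simp [hk, List.append_assoc]

-- B's whole fold computes the four key-filters of the flat list
lemma pv_B_outer (cats : List (String × List (List (String × String)))) :
    ∀ h m l o : List (List (String × String)),
      cats.foldl (fun st p => p.2.foldl (fun st opp => pvRoute st p.1 opp) st) (h, m, l, o) =
        (h ++ (pvFlat cats).filter (fun x => pvPrioKey x == 3),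
         m ++ (pvFlat cats).filter (fun x => pvPrioKey x == 2),
         l ++ (pvFlat cats).filter (fun x => pvPrioKey x == 1),
         o ++ (pvFlat cats).filter (fun x => pvPrioKey x == 0)) := by
  induction cats with
  | nil => intro h m l o; simp [pvFlat]
  | cons c cats ih =>
    intro h m l o
    simp only [List.foldl_cons]
    rw [pv_B_inner c.1 c.2 h m l o, ih]
    simp [pvFlat, List.filter_append, List.append_assoc]

-- ===== VERDICT (by name: the statement is the Claim_ definition above) =====
theorem prioritize_opportunities_py_spec : Claim_equal_prioritize_opportunities_py := by
  intro cats _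
  unfold Spec_prioritize_opportunities_py prioritize_opportunities_py prioritize_opportunities_py_alt
  simp only [pv_A_flat, pv_sorted_eq, pv_B_outer]
  simp [List.append_assoc]
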